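-- pv_equiv track=rewrite | github.com/dang-w/intro-lang-models-python | bow/spam_filter.py | create_features_dictionary
-- ===== SOURCE A (Python) =====
-- def create_features_dictionary(document_tokens):
--   features_dictionary = {}
--   index = 0
--   for token in document_tokens:
--     if token not in features_dictionary:
--       features_dictionary[token] = index
--       index += 1
--   return features_dictionary
-- ===== SOURCE B (Python) =====
-- def create_features_dictionary(document_tokens):
--   features_dictionary = {}
--   remaining = list(document_tokens)
--   while remaining:
--     head = remaining[0]
--     features_dictionary[head] = len(features_dictionary)
--     remaining = [t for t in remaining[1:] if t != head]
--   return features_dictionary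
-- ===== Notes on version B (the rewrite author's own statement) =====
-- stated objective: alternative
-- what changed: Replaces A's single hashed pass with a running index and membership guard by staged filtering: repeatedly take the first remaining token, record it at the current size, and filter every copy of it out of the remainder, so no membership test or index counter is needed.
import Mathlib
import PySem

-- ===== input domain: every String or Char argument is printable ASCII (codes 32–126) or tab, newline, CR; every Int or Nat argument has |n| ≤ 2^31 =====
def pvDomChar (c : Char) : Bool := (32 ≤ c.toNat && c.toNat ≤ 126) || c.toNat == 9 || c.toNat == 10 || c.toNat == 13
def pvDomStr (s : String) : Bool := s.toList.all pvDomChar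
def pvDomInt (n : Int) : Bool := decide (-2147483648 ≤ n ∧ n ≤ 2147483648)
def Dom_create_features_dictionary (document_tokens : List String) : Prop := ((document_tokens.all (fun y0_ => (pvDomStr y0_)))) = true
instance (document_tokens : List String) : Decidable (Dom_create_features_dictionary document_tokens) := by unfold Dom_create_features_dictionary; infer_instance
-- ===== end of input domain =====

-- B replaces A's one-pass loop with a membership guard by staged filtering: repeatedly
-- take the first remaining token, record it, and filter all its copies out of the
-- remainder (alternative decomposition; quadratic, not faster).

-- ===== PORT A =====
-- A: loop over tokens keeping (dict, index); insert an unseen token at the running index.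
def create_features_dictionary (document_tokens : List String) : List (String × Int) :=
  (document_tokens.foldl
    (fun (st : PySem.Dict String Int × Int) token =>
      if st.1.contains token = false then (st.1.insert token st.2, st.2 + 1) else st)
    (PySem.Dict.empty, 0)).1.items

-- ===== PORT B =====
-- B's while loop: take the first remaining token, insert it at the current dict size,
-- and filter all its copies out of the remainder.
def pvAltLoop (d : PySem.Dict String Int) : List String → List (String × Int)
  | [] => d.items
  | head :: rest =>
      pvAltLoop (d.insert head (d.size : Int)) (rest.filter (fun t => t ≠ head))
termination_by l => l.length
decreasing_by
  simp only [List.length_cons, List.length_unattach]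
  exact Nat.lt_succ_of_le (le_trans (List.length_filter_le _ _) (by simp))

def create_features_dictionary_alt (document_tokens : List String) : List (String × Int) :=
  pvAltLoop PySem.Dict.empty document_tokens

-- ===== PRECONDITION & SPEC =====
def Spec_create_features_dictionary (document_tokens : List String) (out : List (String × Int)) : Prop := out = create_features_dictionary_alt document_tokens
instance (document_tokens : List String) (out : List (String × Int)) : Decidable (Spec_create_features_dictionary document_tokens out) := by unfold Spec_create_features_dictionary; infer_instance

-- ===== CLAIM (what is proved, stated in full; the proofs are below) =====
def Claim_equal_create_features_dictionary : Prop := ∀ (document_tokens : List String), Dom_create_features_dictionary document_tokens → Spec_create_features_dictionary document_tokens (create_features_dictionary document_tokens)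

-- ===== LEMMAS AND PROOFS =====

-- the (token, index) pairs generated by a list of already-unique tokens
def pvIdx (seen : List String) : List (String × Int) :=
  (PySem.List.enumerate seen 0).map (fun p => (p.2, p.1))

theorem pvKeys_mkIdx (seen : List String) :
    (PySem.Dict.mk (pvIdx seen)).keys = seen := by
  simp [pvIdx, PySem.Dict.keys, List.map_map, Function.comp_def]

theorem pvContains_mkIdx (seen : List String) (t : String) :
    (PySem.Dict.mk (pvIdx seen)).contains t = seen.contains t := by
  rw [PySem.Dict.contains_eq_decide_mem_keys, pvKeys_mkIdx]
  simp

theorem pvIdx_append (seen : List String) (t : String) :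
    pvIdx (seen ++ [t]) = pvIdx seen ++ [(t, (seen.length : Int))] := by
  simp [pvIdx, PySem.List.enumerate_append, PySem.List.enumerate_cons]

-- invariant of A's loop: starting from the dictionary of an already-seen list,
-- the loop extends it exactly like first-occurrence dedup of the remaining tokens
theorem pvLoop_invariant (ts : List String) (seen : List String) :
    ts.foldl
      (fun (st : PySem.Dict String Int × Int) token =>
        if st.1.contains token = false then (st.1.insert token st.2, st.2 + 1) else st)
      (PySem.Dict.mk (pvIdx seen), (seen.length : Int))
    = (PySem.Dict.mk (pvIdx (ts.foldl PySem.Set.add seen)),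
       ((ts.foldl PySem.Set.add seen).length : Int)) := by
  induction ts generalizing seen with
  | nil => rfl
  | cons t ts ih =>
      simp only [List.foldl_cons, pvContains_mkIdx]
      by_cases h : seen.contains t = true
      · rw [if_neg (by simpa using h)]
        have hadd : PySem.Set.add seen t = seen := by
          simp only [PySem.Set.add, PySem.Set.contains, h, if_true]
        rw [hadd]; exact ih seen
      · have hb : seen.contains t = false := by simpa using h
        rw [if_pos (by simpa using hb)]
        have hc : (PySem.Dict.mk (pvIdx seen)).contains t = false := by
          rw [pvContains_mkIdx, hb]
        have hins : (PySem.Dict.mk (pvIdx seen)).insert t (seen.length : Int)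
            = PySem.Dict.mk (pvIdx (seen ++ [t])) := by
          apply PySem.Dict.ext
          rw [PySem.Dict.items_insert_of_not_contains _ _ hc]
          simp [pvIdx_append]
        have hadd : PySem.Set.add seen t = seen ++ [t] := by
          simp only [PySem.Set.add, PySem.Set.contains, hb]; simp
        rw [hins, hadd]
        have := ih (seen ++ [t])
        simpa using this

-- B's recursion pattern on the dedup: dedup (t :: ts) = t :: dedup (ts minus t)
theorem pvFoldl_add_filter (ts seen : List String) (t : String) (h : t ∈ seen) :
    ts.foldl PySem.Set.add seen = (ts.filter (fun x => x ≠ t)).foldl PySem.Set.add seen := by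
  induction ts generalizing seen with
  | nil => rfl
  | cons u ts ih =>
      by_cases hu : u = t
      · subst hu
        have : PySem.Set.add seen u = seen := by
          simp [PySem.Set.add, PySem.Set.contains, h]
        simp only [List.foldl_cons, this]
        rw [List.filter_cons_of_neg (by simp)]
        exact ih seen h
      · simp only [List.foldl_cons]
        rw [List.filter_cons_of_pos (by simp [hu])]
        simp only [List.foldl_cons]
        exact ih (PySem.Set.add seen u)
          (by simp only [PySem.Set.add]; split
              · exact h
              · simp [h])

theorem pvDedup_cons (t : String) (ts : List String) :
    PySem.List.dedup (t :: ts) = t :: PySem.List.dedup (ts.filter (fun x => x ≠ t)) := by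
  have h1 : PySem.List.dedup (t :: ts) = ts.foldl PySem.Set.add [t] := rfl
  rw [h1, pvFoldl_add_filter ts [t] t (by simp)]
  -- pull the head out of the accumulator: foldl add [t] us = t :: foldl add [] us
  -- whenever no element of us equals t
  have key : ∀ (us : List String), (∀ x ∈ us, x ≠ t) →
      us.foldl PySem.Set.add [t] = t :: us.foldl PySem.Set.add [] := by
    intro us
    -- generalize over the accumulator
    suffices H : ∀ (seen : List String), (∀ x ∈ us, x ≠ t) → t ∉ seen →
        us.foldl PySem.Set.add (t :: seen) = t :: us.foldl PySem.Set.add seen by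
      intro hus
      simpa using H [] hus (by simp)
    induction us with
    | nil => intro _ _ _; rfl
    | cons u us ih =>
        intro seen hus htseen
        have hut : u ≠ t := hus u (by simp)
        have hadd : PySem.Set.add (t :: seen) u = t :: PySem.Set.add seen u := by
          simp only [PySem.Set.add, PySem.Set.contains]
          have : (u ∈ t :: seen) ↔ (u ∈ seen) := by simp [hut]
          by_cases hmem : u ∈ seen
          · simp [hmem, hut]
          · simp [hmem, hut]
        simp only [List.foldl_cons, hadd]
        exact ih _ (fun x hx => hus x (by simp [hx]))
          (by
            simp only [PySem.Set.add]
            split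
            · exact htseen
            · simp [htseen, Ne.symm hut])
    
  rw [key _ (by intro x hx; simpa using (List.mem_filter.mp hx).2)]
  rfl

-- B computes exactly the indexed dedup
-- recursive form of first-occurrence dedup followed by B's loop
def pvDedupR : List String → List String
  | [] => []
  | t :: ts => t :: pvDedupR (ts.filter (fun x => x ≠ t))
termination_by l => l.length
decreasing_by
  simp only [List.length_cons, List.length_unattach]
  exact Nat.lt_succ_of_le (le_trans (List.length_filter_le _ _) (by simp))

theorem pvDedupR_eq_dedup_aux (n : Nat) : ∀ (ts : List String), ts.length ≤ n →
    pvDedupR ts = PySem.List.dedup ts := by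
  induction n with
  | zero =>
      intro ts h
      have : ts = [] := List.eq_nil_of_length_eq_zero (Nat.le_zero.mp h)
      subst this; simp [pvDedupR, PySem.List.dedup, PySem.Set.ofList]
  | succ n ih =>
      intro ts h
      match ts with
      | [] => simp [pvDedupR, PySem.List.dedup, PySem.Set.ofList]
      | t :: ts =>
          have hlen : (ts.filter (fun x => x ≠ t)).length ≤ n :=
            le_trans (List.length_filter_le _ _) (by simpa using h)
          rw [pvDedupR, ih _ hlen, pvDedup_cons]

theorem pvDedupR_eq_dedup (ts : List String) : pvDedupR ts = PySem.List.dedup ts :=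
  pvDedupR_eq_dedup_aux ts.length ts le_rfl

-- invariant of B's loop: starting from the dictionary of the already-emitted tokens,
-- with the remaining tokens disjoint from them, the loop appends their staged dedup
theorem pvAltLoop_invariant_aux (n : Nat) :
    ∀ (rem seen : List String), rem.length ≤ n → (∀ x ∈ rem, x ∉ seen) →
      pvAltLoop (PySem.Dict.mk (pvIdx seen)) rem = pvIdx (seen ++ pvDedupR rem) := by
  induction n with
  | zero =>
      intro rem seen h _
      have : rem = [] := List.eq_nil_of_length_eq_zero (Nat.le_zero.mp h)
      subst this
      simp [pvAltLoop, pvDedupR]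
  | succ n ih =>
      intro rem seen h hdisj
      match rem with
      | [] => simp [pvAltLoop, pvDedupR]
      | head :: rest =>
          have hhead : head ∉ seen := hdisj head (by simp)
          have hc : (PySem.Dict.mk (pvIdx seen)).contains head = false := by
            rw [pvContains_mkIdx]; simpa using hhead
          have hsize : ((PySem.Dict.mk (pvIdx seen)).size : Int) = (seen.length : Int) := by
            simp [PySem.Dict.size, pvIdx]
          have hins : (PySem.Dict.mk (pvIdx seen)).insert head
                ((PySem.Dict.mk (pvIdx seen)).size : Int)
              = PySem.Dict.mk (pvIdx (seen ++ [head])) := by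
            apply PySem.Dict.ext
            rw [PySem.Dict.items_insert_of_not_contains _ _ hc]
            simp [pvIdx_append, hsize]
          rw [pvAltLoop, hins,
            ih (rest.filter (fun t => t ≠ head)) (seen ++ [head])
              (le_trans (List.length_filter_le _ _) (by simpa using h))
              (by
                intro x hx
                have hmem := List.mem_filter.mp hx
                have hx1 : x ∉ seen := hdisj x (by simp [hmem.1])
                have hx2 : x ≠ head := by simpa using hmem.2
                simp [hx1, hx2]),
            pvDedupR]
          simp

theorem pvAlt_eq_pvIdx_dedup (ts : List String) :
    create_features_dictionary_alt ts = pvIdx (PySem.List.dedup ts) := by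
  have h := pvAltLoop_invariant_aux ts.length ts [] le_rfl (by simp)
  simp only [pvIdx, PySem.List.enumerate_nil, List.map_nil, List.nil_append] at h
  rw [create_features_dictionary_alt,
    show (PySem.Dict.empty : PySem.Dict String Int) = PySem.Dict.mk [] from rfl, h,
    pvDedupR_eq_dedup]
  rfl

-- ===== VERDICT (by name: the statement is the Claim_ definition above) =====
theorem create_features_dictionary_spec : Claim_equal_create_features_dictionary := by
  intro ts _
  unfold Spec_create_features_dictionary create_features_dictionary
  have h := pvLoop_invariant ts []
  simp only [pvIdx, PySem.List.enumerate_nil, List.map_nil, List.length_nil, Int.natCast_zero] at h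
  rw [show (PySem.Dict.empty : PySem.Dict String Int) = PySem.Dict.mk [] from rfl, h,
    pvAlt_eq_pvIdx_dedup]
  rfl
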